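-- pv_equiv track=rewrite | github.com/DanyTheOG/spanish-bananagrams-solver | banana_no_gui.py | split_tiles
-- ===== SOURCE A (Python) =====
-- def split_tiles(tiles):
--     """
--     Splits a string of tiles into individual letters, considering special Spanish tiles (CH, LL, RR).
--     """
--     special_tiles = {"CH", "LL", "RR"}
--     result = []
--     i = 0
--     tiles = tiles.upper().replace(" ", "")  # Remove spaces and uppercase
--
--     while i < len(tiles):
--         if i + 1 < len(tiles):
--             pair = tiles[i:i+2]
--             if pair in special_tiles:
--                 result.append(pair)
--                 i += 2
--                 continue
--         result.append(tiles[i])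
--         i += 1
--
--     return result
-- ===== SOURCE B (Python) =====
-- import re
--
-- _TOKEN = re.compile(r'CH|LL|RR|.', re.DOTALL)
--
-- def split_tiles(tiles):
--     """
--     Splits a string of tiles into individual letters, considering special Spanish tiles (CH, LL, RR).
--     """
--     tiles = tiles.upper().replace(" ", "")
--     return _TOKEN.findall(tiles)
-- ===== Notes on version B (the rewrite author's own statement) =====
-- stated objective: idiomatic
-- what changed: Replaces the manual index/while-loop two-then-one tokenizer with regex tokenization: re.findall(r'CH|LL|RR|.', tiles, re.DOTALL) after the same upper/despace preprocessing.
import Mathlib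
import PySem

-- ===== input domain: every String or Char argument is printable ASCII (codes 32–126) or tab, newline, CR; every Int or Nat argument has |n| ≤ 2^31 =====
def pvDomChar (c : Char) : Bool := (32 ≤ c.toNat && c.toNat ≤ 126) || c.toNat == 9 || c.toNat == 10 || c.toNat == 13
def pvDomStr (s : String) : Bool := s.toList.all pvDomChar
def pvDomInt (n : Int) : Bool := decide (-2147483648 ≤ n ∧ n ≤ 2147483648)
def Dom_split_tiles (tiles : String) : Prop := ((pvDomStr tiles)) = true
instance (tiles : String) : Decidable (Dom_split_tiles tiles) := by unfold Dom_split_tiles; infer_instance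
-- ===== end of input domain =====

-- B replaces A's manual index/while-loop tokenizer with regex tokenization
-- (re.findall(r'CH|LL|RR|.', tiles, re.DOTALL) after the same upper()/despace preprocessing);
-- the regex semantics are ported by hand (try CH, LL, RR, then any one character, in order).


-- ===== PORT A =====
-- A's while-loop over index i on the preprocessed characters: if i+1 < len and
-- tiles[i:i+2] is in the special set, append the pair and i += 2; else append tiles[i], i += 1.
def split_tiles_loopA (cs : List Char) (i : Nat) : List String :=
  if h : i < cs.length then
    if i + 1 < cs.length then
      let pair : String := String.ofList ((PySem.List.slice cs (some (i : Int)) (some ((i : Int) + 2))))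
      if pair ∈ PySem.Set.ofList ["CH", "LL", "RR"] then
        pair :: split_tiles_loopA cs (i + 2)
      else
        String.ofList [cs[i]] :: split_tiles_loopA cs (i + 1)
    else
      String.ofList [cs[i]] :: split_tiles_loopA cs (i + 1)
  else []
termination_by cs.length - i


def split_tiles (tiles : String) : List String :=
  split_tiles_loopA (PySem.Chars.replace (PySem.Chars.upper tiles.toList) [' '] []) 0

-- ===== PORT B =====
-- Hand port of re.findall(r'CH|LL|RR|.', s, re.DOTALL): at each position the regex tries the
-- alternatives CH, LL, RR in order, else '.' (with DOTALL) matches any single character, and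
-- scanning resumes after the match. Exact for this pattern on any character list.
def split_tiles_findall (cs : List Char) : List String :=
  match cs with
  | [] => []
  | a :: b :: rest =>
    if a = 'C' ∧ b = 'H' then "CH" :: split_tiles_findall rest
    else if a = 'L' ∧ b = 'L' then "LL" :: split_tiles_findall rest
    else if a = 'R' ∧ b = 'R' then "RR" :: split_tiles_findall rest
    else String.ofList [a] :: split_tiles_findall (b :: rest)
  | [a] => [String.ofList [a]]
termination_by cs.length


def split_tiles_alt (tiles : String) : List String :=
  split_tiles_findall (PySem.Chars.replace (PySem.Chars.upper tiles.toList) [' '] [])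

-- ===== PRECONDITION & SPEC =====
def Spec_split_tiles (tiles : String) (out : List String) : Prop := out = split_tiles_alt tiles
instance (tiles : String) (out : List String) : Decidable (Spec_split_tiles tiles out) := by unfold Spec_split_tiles; infer_instance

-- ===== CLAIM (what is proved, stated in full; the proofs are below) =====
def Claim_equal_split_tiles : Prop := ∀ (tiles : String), Dom_split_tiles tiles → Spec_split_tiles tiles (split_tiles tiles)

-- ===== LEMMAS AND PROOFS =====
theorem ofList_pair_eq_iff (a b x y : Char) :
    String.ofList [a, b] = String.ofList [x, y] ↔ a = x ∧ b = y := by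
  constructor
  · intro h
    have := congrArg String.toList h
    simp at this
    exact this
  · rintro ⟨rfl, rfl⟩; rfl

theorem split_tiles_loop_eq_findall (cs : List Char) (i : Nat) :
    split_tiles_loopA cs i = split_tiles_findall (cs.drop i) := by
  generalize hs : cs.length - i = n
  induction n using Nat.strong_induction_on generalizing i with
  | _ n ih =>
    rw [split_tiles_loopA]
    by_cases h : i < cs.length
    · have hdrop : cs.drop i = cs[i] :: cs.drop (i + 1) := List.drop_eq_getElem_cons h
      by_cases h2 : i + 1 < cs.length
      · have hdrop2 : cs.drop (i + 1) = cs[i+1] :: cs.drop (i + 2) := by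
          rw [List.drop_eq_getElem_cons h2]
        have hslice : PySem.List.slice cs (some (i : Int)) (some ((i : Int) + 2))
            = [cs[i], cs[i+1]] := by
          have : ((i : Int) + 2) = ((i + 2 : Nat) : Int) := by push_cast; ring
          rw [this, PySem.List.slice_natCast]
          have h22 : i + 2 - i = 2 := by omega
          rw [h22, hdrop, hdrop2]
          rfl
        have ih2 : split_tiles_loopA cs (i + 2) = split_tiles_findall (cs.drop (i + 2)) := by
          exact ih (cs.length - (i + 2)) (by omega) (i + 2) rfl
        have ih1 : split_tiles_loopA cs (i + 1) = split_tiles_findall (cs.drop (i + 1)) := by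
          exact ih (cs.length - (i + 1)) (by omega) (i + 1) rfl
        set a := cs[i] with ha
        set b := cs[i+1] with hb
        rw [hdrop, hdrop2, split_tiles_findall, dif_pos h, if_pos h2]
        simp only [hslice]
        have hCH : (String.ofList [a, b] = "CH") ↔ (a = 'C' ∧ b = 'H') := ofList_pair_eq_iff a b 'C' 'H'
        have hLL : (String.ofList [a, b] = "LL") ↔ (a = 'L' ∧ b = 'L') := ofList_pair_eq_iff a b 'L' 'L'
        have hRR : (String.ofList [a, b] = "RR") ↔ (a = 'R' ∧ b = 'R') := ofList_pair_eq_iff a b 'R' 'R'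
        have hmem : (String.ofList [a, b] ∈ PySem.Set.ofList ["CH", "LL", "RR"])
            ↔ ((a = 'C' ∧ b = 'H') ∨ (a = 'L' ∧ b = 'L') ∨ (a = 'R' ∧ b = 'R')) := by
          simp only [PySem.Set.mem_ofList, List.mem_cons, List.not_mem_nil, or_false, hCH, hLL, hRR]
        by_cases hc : a = 'C' ∧ b = 'H'
        · rw [if_pos (hmem.mpr (Or.inl hc)), if_pos hc, hCH.mpr hc, ih2]
        · by_cases hl : a = 'L' ∧ b = 'L'
          · rw [if_pos (hmem.mpr (Or.inr (Or.inl hl))), if_neg hc, if_pos hl, hLL.mpr hl, ih2]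
          · by_cases hr : a = 'R' ∧ b = 'R'
            · rw [if_pos (hmem.mpr (Or.inr (Or.inr hr))), if_neg hc, if_neg hl, if_pos hr,
                hRR.mpr hr, ih2]
            · rw [if_neg (fun hm => by
                  rcases hmem.mp hm with h' | h' | h'
                  · exact hc h'
                  · exact hl h'
                  · exact hr h'),
                if_neg hc, if_neg hl, if_neg hr, ih1, hdrop2]
      · have hlen : cs.length = i + 1 := by omega
        have hdrop1 : cs.drop (i + 1) = [] := by
          apply List.drop_eq_nil_of_le; omega
        rw [dif_pos h, if_neg h2, hdrop, hdrop1, split_tiles_findall]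
        have hd1 : split_tiles_loopA cs (i + 1) = split_tiles_findall (cs.drop (i + 1)) :=
          ih (cs.length - (i + 1)) (by omega) (i + 1) rfl
        rw [hd1, hdrop1, split_tiles_findall]
    · have hd : cs.drop i = [] := List.drop_eq_nil_of_le (by omega)
      rw [dif_neg h, hd, split_tiles_findall]

-- ===== VERDICT (by name: the statement is the Claim_ definition above) =====
theorem split_tiles_spec : Claim_equal_split_tiles := by
  intro tiles _
  unfold Spec_split_tiles split_tiles split_tiles_alt
  simpa using split_tiles_loop_eq_findall _ 0
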